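-- pv_equiv track=rewrite | github.com/alleyyoo/engteklif | backend/services/pdf_analysis_service.py | _fix_turkish_chars
-- ===== SOURCE A (Python) =====
-- def _fix_turkish_chars(text: str) -> str:
--     """Türkçe karakter düzeltmeleri"""
--     if not text:
--         return ""
--     replacements = {
--         "C::": "Ç", "G::": "Ğ", "I::": "İ", "O::": "Ö", "S::": "Ş", "U::": "Ü",
--         "c::": "ç", "g::": "ğ", "i::": "ı", "o::": "ö", "s::": "ş", "u::": "ü"
--     }
--     for wrong, correct in replacements.items():
--         text = text.replace(wrong, correct)
--     return text
-- ===== SOURCE B (Python) =====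
-- def _fix_turkish_chars(text: str) -> str:
--     """Türkçe karakter düzeltmeleri — single left-to-right scan instead of 12 replace passes"""
--     if not text:
--         return ""
--     mapping = {
--         "C": "Ç", "G": "Ğ", "I": "İ", "O": "Ö", "S": "Ş", "U": "Ü",
--         "c": "ç", "g": "ğ", "i": "ı", "o": "ö", "s": "ş", "u": "ü"
--     }
--     out = []
--     i = 0
--     n = len(text)
--     while i < n:
--         ch = text[i]
--         if ch in mapping and text[i + 1:i + 3] == "::":
--             out.append(mapping[ch])
--             i += 3
--         else:
--             out.append(ch)
--             i += 1
--     return "".join(out)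
-- ===== Notes on version B (the rewrite author's own statement) =====
-- stated objective: alternative
-- what changed: Replaces A's 12 sequential full-text str.replace passes with a single left-to-right index scan that consults a per-letter lookup table and, on a letter followed by two colons, emits the mapped character and advances by 3, building the output in one pass.
import Mathlib
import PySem

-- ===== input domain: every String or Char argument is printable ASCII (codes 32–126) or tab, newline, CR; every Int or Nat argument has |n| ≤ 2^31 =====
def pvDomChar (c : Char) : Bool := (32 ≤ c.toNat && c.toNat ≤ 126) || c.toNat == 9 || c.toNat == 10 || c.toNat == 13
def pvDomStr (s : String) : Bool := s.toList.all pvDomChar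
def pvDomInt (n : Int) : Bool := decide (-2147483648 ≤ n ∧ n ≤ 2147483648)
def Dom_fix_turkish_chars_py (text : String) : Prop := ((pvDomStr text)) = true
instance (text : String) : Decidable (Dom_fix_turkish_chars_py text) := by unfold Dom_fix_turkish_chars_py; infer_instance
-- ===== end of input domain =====

-- B replaces A's 12 sequential full-text str.replace passes by ONE left-to-right scan with a
-- per-letter lookup table (objective: alternative single-pass algorithm, same result).

-- ===== PORT A =====
-- literal transliteration of A: guard on empty text, then one str.replace per dict item, in order
def fix_turkish_chars_py (text : String) : String :=
  if text = "" then ""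
  else
    let replacements : PySem.Dict String String :=
      PySem.Dict.empty |>.insert "C::" "Ç" |>.insert "G::" "Ğ" |>.insert "I::" "İ"
        |>.insert "O::" "Ö" |>.insert "S::" "Ş" |>.insert "U::" "Ü"
        |>.insert "c::" "ç" |>.insert "g::" "ğ" |>.insert "i::" "ı"
        |>.insert "o::" "ö" |>.insert "s::" "ş" |>.insert "u::" "ü"
    replacements.items.foldl (fun t wc => PySem.Str.replace t wc.1 wc.2) text

-- ===== PORT B =====
-- B's per-letter mapping {'C': 'Ç', …}
def pvTable : List (Char × Char) :=
  [('C','Ç'),('G','Ğ'),('I','İ'),('O','Ö'),('S','Ş'),('U','Ü'),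
   ('c','ç'),('g','ğ'),('i','ı'),('o','ö'),('s','ş'),('u','ü')]

-- B's while loop: at index i, if text[i] in mapping and text[i+1:i+3] == "::", emit the mapped
-- char and advance 3, else emit text[i] and advance 1 (table passed as a parameter)
def pvScanT (T : List (Char × Char)) : List Char → List Char
  | [] => []
  | [x] => [x]
  | [x, y] => [x, y]
  | x :: y :: z :: rest =>
    match T.lookup x with
    | some v => if y = ':' ∧ z = ':' then v :: pvScanT T rest else x :: pvScanT T (y :: z :: rest)
    | none => x :: pvScanT T (y :: z :: rest)

def fix_turkish_chars_py_alt (text : String) : String :=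
  if text = "" then "" else String.ofList (pvScanT pvTable text.toList)

-- ===== PRECONDITION & SPEC =====
def Spec_fix_turkish_chars_py (text : String) (out : String) : Prop := out = fix_turkish_chars_py_alt text
instance (text : String) (out : String) : Decidable (Spec_fix_turkish_chars_py text out) := by unfold Spec_fix_turkish_chars_py; infer_instance

-- ===== CLAIM (what is proved, stated in full; the proofs are below) =====
def Claim_equal_fix_turkish_chars_py : Prop := ∀ (text : String), Dom_fix_turkish_chars_py text → Spec_fix_turkish_chars_py text (fix_turkish_chars_py text)

-- ===== LEMMAS AND PROOFS =====

-- one str.replace pass with a 3-char pattern [a,':',':'] and 1-char replacement [v]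
def pvRep (a v : Char) : List Char → List Char
  | [] => []
  | [x] => [x]
  | [x, y] => [x, y]
  | x :: y :: z :: rest =>
    if x = a ∧ y = ':' ∧ z = ':' then v :: pvRep a v rest else x :: pvRep a v (y :: z :: rest)

theorem pvRep_cons_of_not_prefix {a v c : Char} {t : List Char}
    (h : ¬ [a, ':', ':'] <+: (c :: t)) : pvRep a v (c :: t) = c :: pvRep a v t := by
  rcases t with _ | ⟨y, _ | ⟨z, r⟩⟩
  · simp [pvRep]
  · simp [pvRep]
  · rw [pvRep, if_neg]
    intro ⟨h1, h2, h3⟩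
    exact h (by simp [h1, h2, h3, List.cons_prefix_cons])

theorem pvGo_eq (a v : Char) :
    ∀ (fuel : Nat) (l acc : List Char), l.length ≤ fuel →
      PySem.Chars.replace.go [a, ':', ':'] [v] fuel l acc = acc.reverse ++ pvRep a v l := by
  intro fuel
  induction fuel with
  | zero =>
    intro l acc h
    have : l = [] := List.length_eq_zero_iff.mp (Nat.le_zero.mp h)
    subst this
    simp [PySem.Chars.replace.go, pvRep]
  | succ n ih =>
    intro l acc h
    rcases l with _ | ⟨c, t⟩
    · simp [PySem.Chars.replace.go, pvRep]
    · rw [PySem.Chars.replace.go]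
      by_cases hp : [a, ':', ':'] <+: (c :: t)
      · rw [if_pos (List.isPrefixOf_iff_prefix.mpr hp)]
        obtain ⟨s, hs⟩ := hp
        have hl : c :: t = a :: ':' :: ':' :: s := hs.symm
        rw [hl]
        have hlen : s.length ≤ n := by
          rw [hl] at h; simp at h; omega
        rw [show List.drop [a, ':', ':'].length (a :: ':' :: ':' :: s) = s by simp]
        rw [ih s ([v].reverse ++ acc) hlen]
        simp [pvRep]
      · rw [if_neg (by simpa [List.isPrefixOf_iff_prefix] using hp)]
        rw [ih t (c :: acc) (by simpa using Nat.le_of_succ_le_succ h)]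
        rw [pvRep_cons_of_not_prefix hp]
        simp

theorem pvReplace_eq (a v : Char) (s : List Char) :
    PySem.Chars.replace s [a, ':', ':'] [v] = pvRep a v s := by
  have h := pvGo_eq a v s.length s [] (le_refl _)
  simpa [PySem.Chars.replace] using h

theorem pvScanT_nil (cs : List Char) : pvScanT [] cs = cs := by
  induction cs using pvScanT.induct (T := []) <;> simp_all [pvScanT]

theorem pvScanT_cons_of_lookup_none {T : List (Char × Char)} {x : Char}
    (h : T.lookup x = none) (m : List Char) : pvScanT T (x :: m) = x :: pvScanT T m := by
  rcases m with _ | ⟨b, _ | ⟨c, r⟩⟩ <;> simp [pvScanT, h]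

-- "the list does not start with two colons"
def pvNC : List Char → Prop
  | x :: y :: _ => ¬ (x = ':' ∧ y = ':')
  | _ => True

theorem pvScanT_cons_of_pvNC {m : List Char} (h : pvNC m) (T : List (Char × Char)) (x : Char) :
    pvScanT T (x :: m) = x :: pvScanT T m := by
  rcases m with _ | ⟨b, _ | ⟨c, r⟩⟩
  · simp [pvScanT]
  · simp [pvScanT]
  · simp only [pvNC] at h
    cases hl : T.lookup x <;> simp [pvScanT, hl, h]

theorem pvRep_cons_of_ne {a x : Char} (v : Char) (h : x ≠ a) (t : List Char) :
    pvRep a v (x :: t) = x :: pvRep a v t := by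
  rcases t with _ | ⟨y, _ | ⟨z, r⟩⟩ <;> simp [pvRep, h]

theorem pvNC_cons_of_ne {x : Char} (hx : x ≠ ':') (m : List Char) : pvNC (x :: m) := by
  rcases m with _ | ⟨w, r⟩ <;> simp [pvNC, hx]

theorem pvNC_pvRep {a v : Char} (hv : v ≠ ':') {l : List Char} (h : pvNC l) :
    pvNC (pvRep a v l) := by
  rcases l with _ | ⟨x, _ | ⟨y, _ | ⟨z, r⟩⟩⟩
  · simp [pvRep, pvNC]
  · simp [pvRep, pvNC]
  · simpa [pvRep, pvNC] using h
  · simp only [pvNC] at h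
    rw [pvRep]
    split_ifs with hm
    · exact pvNC_cons_of_ne hv _
    · by_cases hx : x = ':'
      · subst hx
        have hy : y ≠ ':' := fun hy => h ⟨rfl, hy⟩
        rcases r with _ | ⟨w, r2⟩
        · simp [pvRep, pvNC, hy]
        · rw [pvRep]
          split_ifs with hm2
          · simp [pvNC, hv]
          · simp [pvNC, hy]
      · exact pvNC_cons_of_ne hx _

-- the key lemma: scanning with key (a,v) in front = one replace pass for (a,v), then scanning
-- with the remaining keys
theorem pvMain {a v : Char} {K : List (Char × Char)}
    (ha : a ≠ ':') (hv : v ≠ ':') (haK : K.lookup a = none) (hvK : K.lookup v = none) :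
    ∀ cs, pvScanT ((a, v) :: K) cs = pvScanT K (pvRep a v cs) := by
  have H : ∀ (n : Nat) (cs : List Char), cs.length ≤ n →
      pvScanT ((a, v) :: K) cs = pvScanT K (pvRep a v cs) := by
    intro n
    induction n with
    | zero =>
      intro cs h
      have : cs = [] := List.length_eq_zero_iff.mp (Nat.le_zero.mp h)
      subst this
      simp [pvScanT, pvRep]
    | succ n ih =>
      intro cs h
      rcases cs with _ | ⟨x, _ | ⟨y, _ | ⟨z, rest⟩⟩⟩
      · simp [pvScanT, pvRep]
      · simp [pvScanT, pvRep]
      · simp [pvScanT, pvRep]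
      · have hr : rest.length ≤ n := by simp at h; omega
        have hyz : (y :: z :: rest).length ≤ n := by simp at h ⊢; omega
        by_cases hxa : x = a
        · subst hxa
          by_cases hcol : y = ':' ∧ z = ':'
          · obtain ⟨hy, hz⟩ := hcol; subst hy; subst hz
            have e1 : pvScanT ((x, v) :: K) (x :: ':' :: ':' :: rest)
                = v :: pvScanT ((x, v) :: K) rest := by simp [pvScanT, List.lookup]
            have e2 : pvRep x v (x :: ':' :: ':' :: rest) = v :: pvRep x v rest := by
              simp [pvRep]
            rw [e1, e2, pvScanT_cons_of_lookup_none hvK, ih rest hr]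
          · have e1 : pvScanT ((x, v) :: K) (x :: y :: z :: rest)
                = x :: pvScanT ((x, v) :: K) (y :: z :: rest) := by
              rw [pvScanT]
              simp only [List.lookup_cons, beq_self_eq_true]
              rw [if_neg hcol]
            have e2 : pvRep x v (x :: y :: z :: rest) = x :: pvRep x v (y :: z :: rest) := by
              rw [pvRep, if_neg (by tauto)]
            rw [e1, e2,
              pvScanT_cons_of_pvNC (pvNC_pvRep hv (by simpa [pvNC] using hcol)),
              ih _ hyz]
        · have e2 : pvRep a v (x :: y :: z :: rest) = x :: pvRep a v (y :: z :: rest) :=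
            pvRep_cons_of_ne v hxa _
          have hlk : ((a, v) :: K).lookup x = K.lookup x := by
            have hb : (x == a) = false := beq_eq_false_iff_ne.mpr hxa
            simp [List.lookup_cons, hb]
          by_cases hcol : y = ':' ∧ z = ':'
          · obtain ⟨hy, hz⟩ := hcol; subst hy; subst hz
            have e3 : pvRep a v (':' :: ':' :: rest) = ':' :: ':' :: pvRep a v rest := by
              rw [pvRep_cons_of_ne v (Ne.symm ha), pvRep_cons_of_ne v (Ne.symm ha)]
            cases hl : K.lookup x with
            | none =>
              have e1 : pvScanT ((a, v) :: K) (x :: ':' :: ':' :: rest)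
                  = x :: pvScanT ((a, v) :: K) (':' :: ':' :: rest) := by
                rw [pvScanT, hlk, hl]
              rw [e1, ih _ hyz, e2, e3, pvScanT_cons_of_lookup_none hl]
            | some w =>
              have e1 : pvScanT ((a, v) :: K) (x :: ':' :: ':' :: rest)
                  = w :: pvScanT ((a, v) :: K) rest := by
                rw [pvScanT, hlk, hl]; simp
              have e4 : pvScanT K (x :: ':' :: ':' :: pvRep a v rest)
                  = w :: pvScanT K (pvRep a v rest) := by
                rw [pvScanT, hl]; simp
              rw [e1, e2, e3, e4, ih rest hr]
          · have e1 : pvScanT ((a, v) :: K) (x :: y :: z :: rest)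
                = x :: pvScanT ((a, v) :: K) (y :: z :: rest) := by
              rw [pvScanT, hlk]
              cases hl : K.lookup x <;> simp [hcol]
            rw [e1, e2,
              pvScanT_cons_of_pvNC (pvNC_pvRep hv (by simpa [pvNC] using hcol)),
              ih _ hyz]
  intro cs
  exact H cs.length cs (le_refl _)

def pvGood : List (Char × Char) → Bool
  | [] => true
  | (a, v) :: K => (a ≠ ':' : Bool) && (v ≠ ':' : Bool) && (K.lookup a).isNone && (K.lookup v).isNone && pvGood K

theorem pvFold_scan : ∀ (T : List (Char × Char)), pvGood T = true → ∀ cs,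
    T.foldl (fun l p => pvRep p.1 p.2 l) cs = pvScanT T cs := by
  intro T
  induction T with
  | nil => intro _ cs; simp [pvScanT_nil]
  | cons p K ih =>
    obtain ⟨a, v⟩ := p
    intro hg cs
    simp only [pvGood, Bool.and_eq_true, decide_eq_true_eq, Option.isNone_iff_eq_none] at hg
    obtain ⟨⟨⟨⟨ha, hv⟩, haK⟩, hvK⟩, hgK⟩ := hg
    simp only [List.foldl_cons]
    rw [ih hgK, ← pvMain ha hv haK hvK]

theorem pvA_fold (t : String) :
    fix_turkish_chars_py t =
      if t = "" then "" else String.ofList (pvTable.foldl (fun l p => pvRep p.1 p.2 l) t.toList) := by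
  unfold fix_turkish_chars_py
  split_ifs with h
  · rfl
  · simp only [pvTable, List.foldl_cons, List.foldl_nil]
    show List.foldl _ t _ = _
    have hitems : (PySem.Dict.empty |>.insert "C::" "Ç" |>.insert "G::" "Ğ" |>.insert "I::" "İ"
        |>.insert "O::" "Ö" |>.insert "S::" "Ş" |>.insert "U::" "Ü"
        |>.insert "c::" "ç" |>.insert "g::" "ğ" |>.insert "i::" "ı"
        |>.insert "o::" "ö" |>.insert "s::" "ş" |>.insert "u::" "ü" :
          PySem.Dict String String).items
        = [("C::", "Ç"), ("G::", "Ğ"), ("I::", "İ"), ("O::", "Ö"), ("S::", "Ş"), ("U::", "Ü"),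
           ("c::", "ç"), ("g::", "ğ"), ("i::", "ı"), ("o::", "ö"), ("s::", "ş"), ("u::", "ü")] := by
      rfl
    rw [hitems]
    simp only [List.foldl_cons, List.foldl_nil]
    have hrep : ∀ (s : String) (o n : String),
        PySem.Str.replace s o n = String.ofList (PySem.Chars.replace s.toList o.toList n.toList) :=
      fun _ _ _ => rfl
    simp only [hrep, String.toList_ofList]
    simp only [show ("C::".toList) = ['C', ':', ':'] from rfl, show ("Ç".toList) = ['Ç'] from rfl,
      show ("G::".toList) = ['G', ':', ':'] from rfl, show ("Ğ".toList) = ['Ğ'] from rfl,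
      show ("I::".toList) = ['I', ':', ':'] from rfl, show ("İ".toList) = ['İ'] from rfl,
      show ("O::".toList) = ['O', ':', ':'] from rfl, show ("Ö".toList) = ['Ö'] from rfl,
      show ("S::".toList) = ['S', ':', ':'] from rfl, show ("Ş".toList) = ['Ş'] from rfl,
      show ("U::".toList) = ['U', ':', ':'] from rfl, show ("Ü".toList) = ['Ü'] from rfl,
      show ("c::".toList) = ['c', ':', ':'] from rfl, show ("ç".toList) = ['ç'] from rfl,
      show ("g::".toList) = ['g', ':', ':'] from rfl, show ("ğ".toList) = ['ğ'] from rfl,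
      show ("i::".toList) = ['i', ':', ':'] from rfl, show ("ı".toList) = ['ı'] from rfl,
      show ("o::".toList) = ['o', ':', ':'] from rfl, show ("ö".toList) = ['ö'] from rfl,
      show ("s::".toList) = ['s', ':', ':'] from rfl, show ("ş".toList) = ['ş'] from rfl,
      show ("u::".toList) = ['u', ':', ':'] from rfl, show ("ü".toList) = ['ü'] from rfl]
    simp only [pvReplace_eq]

-- ===== VERDICT (by name: the statement is the Claim_ definition above) =====
theorem fix_turkish_chars_py_spec : Claim_equal_fix_turkish_chars_py := by
  intro text _
  unfold Spec_fix_turkish_chars_py fix_turkish_chars_py_alt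
  rw [pvA_fold, pvFold_scan pvTable (by decide)]
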